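-- pv_equiv track=rewrite | github.com/roliverosc/script.cu.lrclyrics | resources/lib/embedlrc.py | endOfString
-- ===== SOURCE A (Python) =====
-- def endOfString(string, utf16=False):
--     if (utf16):
--         pos = 0
--         while True:
--             pos += string[pos:].find('\x00\x00') + 1
--             if (pos % 2 == 1):
--                 return pos - 1
--     else:
--         return string.find('\x00')
-- ===== SOURCE B (Python) =====
-- def endOfString(string, utf16=False):
--     if utf16:
--         # step-by-2 scan: only even indices are ever inspected; slicing never raises,
--         # so this loops forever when no even-aligned NUL pair exists (as A does)
--         i = 0
--         while True:
--             if string[i:i+2] == '\x00\x00':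
--                 return i
--             i += 2
--     else:
--         for i, ch in enumerate(string):
--             if ch == '\x00':
--                 return i
--         return -1
-- ===== Notes on version B (the rewrite author's own statement) =====
-- stated objective: simpler
-- what changed: The non-utf16 branch becomes an explicit enumerate scan for the first NUL instead of str.find, and the utf16 branch replaces the find-plus-parity arithmetic loop with a direct step-by-2 scan of 2-char slices that is even-aligned by construction.
import Mathlib
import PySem

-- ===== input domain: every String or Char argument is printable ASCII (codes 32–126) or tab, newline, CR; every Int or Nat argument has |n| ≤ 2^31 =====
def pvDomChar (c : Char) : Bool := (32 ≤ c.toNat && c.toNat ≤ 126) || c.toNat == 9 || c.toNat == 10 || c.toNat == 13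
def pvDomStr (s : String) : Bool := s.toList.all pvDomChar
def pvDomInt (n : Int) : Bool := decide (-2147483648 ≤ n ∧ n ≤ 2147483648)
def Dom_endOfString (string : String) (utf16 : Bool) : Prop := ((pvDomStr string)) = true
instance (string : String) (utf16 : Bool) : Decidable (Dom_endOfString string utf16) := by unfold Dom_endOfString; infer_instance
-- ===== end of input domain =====

-- B replaces A's find-plus-parity utf16 loop by an aligned step-by-2 slice scan and the
-- non-utf16 str.find by an explicit indexed scan (objective: simpler).

-- ===== PORT A =====
-- while True: pos += string[pos:].find('\x00\x00') + 1; if pos % 2 == 1: return pos - 1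
-- Fuel-bounded transliteration: fuel 0 stands for Python's non-termination (excluded by Pre_).
def endOfStringA_loop (s : List Char) (pos : Int) : Nat → Int
  | 0 => 0
  | fuel + 1 =>
    let pos' := pos + PySem.Chars.find (PySem.List.slice s (some pos) none) ['\x00', '\x00'] + 1
    if PySem.Int.mod pos' 2 = 1 then pos' - 1 else endOfStringA_loop s pos' fuel

def endOfString (string : String) (utf16 : Bool) : Int :=
  if utf16 then endOfStringA_loop string.toList 0 (string.toList.length + 1)
  else PySem.Chars.find string.toList ['\x00']

-- ===== PORT B =====
-- i = 0; while True: if string[i:i+2] == '\x00\x00': return i; i += 2   (fuel = non-termination)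
def endOfStringB_loop (s : List Char) (i : Int) : Nat → Int
  | 0 => 0
  | fuel + 1 =>
    if PySem.List.slice s (some i) (some (i + 2)) = ['\x00', '\x00'] then i
    else endOfStringB_loop s (i + 2) fuel

-- for i, ch in enumerate(string): if ch == '\x00': return i; return -1
def endOfStringB_scan (cs : List Char) (i : Int) : Int :=
  match cs with
  | [] => -1
  | c :: rest => if c = '\x00' then i else endOfStringB_scan rest (i + 1)

def endOfString_alt (string : String) (utf16 : Bool) : Int :=
  if utf16 then endOfStringB_loop string.toList 0 (string.toList.length + 1)
  else endOfStringB_scan string.toList 0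

-- ===== PRECONDITION & SPEC =====
-- Pre_ excludes exactly the utf16 inputs whose string has no even-aligned '\x00\x00' pair:
-- there A's while-loop never returns (it diverges), and B diverges there too.
def Pre_endOfString (string : String) (utf16 : Bool) : Prop :=
  utf16 = false ∨ ∃ i < string.toList.length - 1, i % 2 = 0 ∧
    string.toList[i]? = some '\x00' ∧ string.toList[i+1]? = some '\x00'
instance (string : String) (utf16 : Bool) : Decidable (Pre_endOfString string utf16) := by unfold Pre_endOfString; infer_instance

def pvWitness_endOfString : String × Bool := ("abc", false)

def Spec_endOfString (string : String) (utf16 : Bool) (out : Int) : Prop := out = endOfString_alt string utf16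
instance (string : String) (utf16 : Bool) (out : Int) : Decidable (Spec_endOfString string utf16 out) := by unfold Spec_endOfString; infer_instance

-- ===== CLAIM (what is proved, stated in full; the proofs are below) =====
def Claim_equal_endOfString : Prop := ∀ (string : String) (utf16 : Bool), Dom_endOfString string utf16 → Pre_endOfString string utf16 → Spec_endOfString string utf16 (endOfString string utf16)

-- ===== LEMMAS AND PROOFS =====

theorem nul_not_mem_of_dom (cs : List Char) (h : cs.all pvDomChar = true) : '\x00' ∉ cs := by
  intro hmem
  have := List.all_eq_true.mp h _ hmem
  simp [pvDomChar] at this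

theorem scan_eq_neg_one (cs : List Char) (i : Int) (h : '\x00' ∉ cs) :
    endOfStringB_scan cs i = -1 := by
  induction cs generalizing i with
  | nil => rfl
  | cons c rest ih =>
    simp only [endOfStringB_scan]
    rw [if_neg (by intro hc; exact h (hc ▸ List.mem_cons_self)), ih (i + 1) (fun hm => h (List.mem_cons_of_mem _ hm))]

theorem find_eq_neg_one (cs : List Char) (h : '\x00' ∉ cs) :
    PySem.Chars.find cs ['\x00'] = -1 := by
  rw [PySem.Chars.find_eq_neg_one_iff]
  intro hinf
  exact h (hinf.subset List.mem_cons_self)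

-- ===== VERDICT (by name: the statement is the Claim_ definition above) =====
theorem endOfString_spec : Claim_equal_endOfString := by
  intro s utf16 hdom hpre
  unfold Spec_endOfString
  have hnul : '\x00' ∉ s.toList := nul_not_mem_of_dom _ hdom
  cases utf16 with
  | false =>
    simp only [endOfString, endOfString_alt, if_neg (Bool.false_ne_true)]
    rw [find_eq_neg_one _ hnul, scan_eq_neg_one _ 0 hnul]
  | true =>
    -- inside Dom the string has no NUL, so Pre_'s second disjunct is impossible
    rcases hpre with hpre | ⟨i, _, _, hget, _⟩
    · exact absurd hpre (by simp)
    · exact absurd (List.mem_of_getElem? hget) hnul
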